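-- pv_equiv track=rewrite | github.com/J-Spellacy/RANDOM_TASKS | problem9.py | non_adj_sum
-- ===== SOURCE A (Python) =====
-- def create_index_value_dict(int_list: list):
--     return {index: value for index, value in enumerate(int_list)}
--
-- def non_adj_sum(int_list: list):
--     int_dict = create_index_value_dict(int_list)
--     sorted_int_dict = {k: v for k, v in reversed(sorted(int_dict.items(), key=lambda item: item[0])) if v > 0} # sorted and filtered
--     for k in list(sorted_int_dict.keys()): # copies keys as a list so that for loop doesn't alter dictionary mid loop
--         if (sorted_int_dict.get(k+1, 0) + sorted_int_dict.get(k-1, 0)) >= sorted_int_dict[k]: # get(k, 0) defaults the value to 0 if the item doesn't exist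
--             del sorted_int_dict[k]
--     sum_max = sum(sorted_int_dict.values())
--     return sorted_int_dict, sum_max
-- ===== SOURCE B (Python) =====
-- def non_adj_sum(int_list: list):
--     # single backward pass: no sort, no index dict; one scalar tracks the
--     # surviving right neighbor's value
--     result = {}
--     right_val = 0
--     for i in range(len(int_list) - 1, -1, -1):
--         v = int_list[i]
--         if v > 0:
--             left = int_list[i - 1] if i - 1 >= 0 and int_list[i - 1] > 0 else 0
--             if right_val + left >= v:
--                 right_val = 0
--             else:
--                 result[i] = v
--                 right_val = v
--         else:
--             right_val = 0
--     return result, sum(result.values())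
-- ===== Notes on version B (the rewrite author's own statement) =====
-- stated objective: simpler
-- what changed: A builds an index->value dict, sorts its items, reverses, filters, then deletes entries from the dict mid-loop using neighbour lookups; B is a single backward pass over indices carrying one scalar (the surviving right neighbour's value), with no sort and no neighbour dict lookups.
import Mathlib
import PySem

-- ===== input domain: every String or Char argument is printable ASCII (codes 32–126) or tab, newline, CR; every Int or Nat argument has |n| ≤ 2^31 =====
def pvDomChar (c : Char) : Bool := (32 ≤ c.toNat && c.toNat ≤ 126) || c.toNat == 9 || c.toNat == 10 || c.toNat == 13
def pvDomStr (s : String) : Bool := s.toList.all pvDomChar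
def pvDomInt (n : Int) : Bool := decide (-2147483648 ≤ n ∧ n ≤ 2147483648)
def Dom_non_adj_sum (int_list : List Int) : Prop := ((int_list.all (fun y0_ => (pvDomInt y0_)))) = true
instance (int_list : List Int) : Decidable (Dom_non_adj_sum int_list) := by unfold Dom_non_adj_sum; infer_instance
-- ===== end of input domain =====

-- B replaces A's sort + index dict + mid-loop deletions by one backward pass carrying a
-- single scalar (the surviving right neighbour); objective: simpler and measurably faster.

-- ===== PORT A =====
def create_index_value_dict (int_list : List Int) : PySem.Dict Int Int :=
  (PySem.List.enumerate int_list).foldl (fun d p => d.insert p.1 p.2) PySem.Dict.empty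

-- the body of A's for-loop over the copied keys list; 'sorted_int_dict[k]' is ported as
-- 'd.getD k 0', exact here because every key of the copied list is still present when visited
def pvAStep (d : PySem.Dict Int Int) (k : Int) : PySem.Dict Int Int :=
  if d.getD (k + 1) 0 + d.getD (k - 1) 0 ≥ d.getD k 0 then d.erase k else d

def non_adj_sum (int_list : List Int) : (List (Int × Int)) × Int :=
  let int_dict := create_index_value_dict int_list
  let sorted_int_dict :=
    (((PySem.List.sorted int_dict.items (fun item => item.1)).reverse.filter
        (fun p => decide (p.2 > 0))).foldl (fun d p => d.insert p.1 p.2) PySem.Dict.empty)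
  let final := sorted_int_dict.keys.foldl pvAStep sorted_int_dict
  (final.items, final.values.sum)

-- ===== PORT B =====
-- the body of B's backward for-loop; 'int_list[i]' is ported as 'pyGetD int_list i 0',
-- exact here because the loop only produces indices 0 ≤ i < len and the i-1 read is guarded
def pvBStep (int_list : List Int) (st : PySem.Dict Int Int × Int) (i : Int) :
    PySem.Dict Int Int × Int :=
  let v := PySem.List.pyGetD int_list i 0
  if v > 0 then
    let left := if i - 1 ≥ 0 ∧ PySem.List.pyGetD int_list (i - 1) 0 > 0
                then PySem.List.pyGetD int_list (i - 1) 0 else 0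
    if st.2 + left ≥ v then (st.1, 0) else (st.1.insert i v, v)
  else (st.1, 0)

def non_adj_sum_alt (int_list : List Int) : (List (Int × Int)) × Int :=
  let st := (PySem.List.pyRange ((int_list.length : Int) - 1) (-1) (-1)).foldl
      (pvBStep int_list) (PySem.Dict.empty, 0)
  (st.1.items, st.1.values.sum)

-- ===== PRECONDITION & SPEC =====
def Spec_non_adj_sum (int_list : List Int) (out : (List (Int × Int)) × Int) : Prop := out = non_adj_sum_alt int_list
instance (int_list : List Int) (out : (List (Int × Int)) × Int) : Decidable (Spec_non_adj_sum int_list out) := by unfold Spec_non_adj_sum; infer_instance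

-- ===== CLAIM (what is proved, stated in full; the proofs are below) =====
def Claim_equal_non_adj_sum : Prop := ∀ (int_list : List Int), Dom_non_adj_sum int_list → Spec_non_adj_sum int_list (non_adj_sum int_list)

-- ===== LEMMAS AND PROOFS =====

-- the common value of both programs: survivors of a backward pass over the indices,
-- threading the surviving right neighbour's value r
def pvSpecGo (xs : List Int) : Nat → Int → List (Int × Int)
  | 0, _ => []
  | i + 1, r =>
    let v := xs.getD i 0
    if 0 < v then
      let left := if 0 < i ∧ 0 < xs.getD (i - 1) 0 then xs.getD (i - 1) 0 else 0
      if v ≤ r + left then pvSpecGo xs i 0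
      else ((i : Int), v) :: pvSpecGo xs i v
    else pvSpecGo xs i 0

-- A's filtered, reversed enumeration of the first i elements
def pvQ (xs : List Int) (i : Nat) : List (Int × Int) :=
  ((PySem.List.enumerate (xs.take i)).reverse).filter (fun p => decide (p.2 > 0))

lemma pvQ_zero (xs : List Int) : pvQ xs 0 = [] := by
  simp [pvQ]

lemma pvQ_succ (xs : List Int) (i : Nat) (hi : i < xs.length) :
    pvQ xs (i + 1) =
      if 0 < xs.getD i 0 then ((i : Int), xs.getD i 0) :: pvQ xs i else pvQ xs i := by
  unfold pvQ
  rw [List.take_add_one, List.getElem?_eq_getElem hi]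
  rw [PySem.List.enumerate_append]
  have hlen : (xs.take i).length = i := by simp [Nat.le_of_lt hi]
  simp only [hlen, Option.toList_some]
  rw [List.getD_eq_getElem xs 0 hi]
  simp [PySem.List.enumerate]
  split_ifs <;> simp_all

lemma pvQ_mem (xs : List Int) (i : Nat) {p : Int × Int} (hp : p ∈ pvQ xs i) :
    0 ≤ p.1 ∧ p.1 < (i : Int) := by
  unfold pvQ at hp
  rw [List.mem_filter] at hp
  have := hp.1
  rw [List.mem_reverse] at this
  rw [PySem.List.mem_enumerate_iff] at this
  obtain ⟨k, hk, rfl⟩ := this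
  simp at hk ⊢
  omega

lemma get?_mk_append (S T : List (Int × Int)) (k : Int) :
    (PySem.Dict.mk (S ++ T)).get? k =
      ((PySem.Dict.mk S).get? k).orElse (fun _ => (PySem.Dict.mk T).get? k) := by
  simp [PySem.Dict.get?, List.find?_append, Option.map_or]

lemma get?_mk_eq_none (S : List (Int × Int)) (k : Int) (h : ∀ p ∈ S, p.1 ≠ k) :
    (PySem.Dict.mk S).get? k = none := by
  simp [PySem.Dict.get?, List.find?_eq_none]
  intro a b hab
  exact fun hb => h (a, b) hab (by exact_mod_cast hb)

lemma pvQ_get?_none (xs : List Int) (j : Nat) (k : Int) (hk : (j : Int) ≤ k) :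
    (PySem.Dict.mk (pvQ xs j)).get? k = none :=
  get?_mk_eq_none _ _ (fun p hp => by have := pvQ_mem xs j hp; omega)

lemma getD_mk_append_right_none (S T : List (Int × Int)) (k : Int)
    (h : (PySem.Dict.mk T).get? k = none) :
    (PySem.Dict.mk (S ++ T)).getD k 0 = (PySem.Dict.mk S).getD k 0 := by
  simp only [PySem.Dict.getD, get?_mk_append, h]
  cases (PySem.Dict.mk S).get? k <;> rfl

lemma getD_mk_append_left_none (S T : List (Int × Int)) (k : Int)
    (h : (PySem.Dict.mk S).get? k = none) :
    (PySem.Dict.mk (S ++ T)).getD k 0 = (PySem.Dict.mk T).getD k 0 := by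
  simp only [PySem.Dict.getD, get?_mk_append, h, Option.orElse_none]

lemma pvB_loop (xs : List Int) (i : Nat) (d : PySem.Dict Int Int) (r : Int)
    (hfresh : ∀ k ∈ d.keys, (i : Int) ≤ k) :
    ((PySem.List.pyRange ((i : Int) - 1) (-1) (-1)).foldl (pvBStep xs) (d, r)).1.items
      = d.items ++ pvSpecGo xs i r := by
  induction i generalizing d r with
  | zero =>
    rw [PySem.List.pyRange_neg_one_eq_nil (by norm_num)]
    simp [pvSpecGo]
  | succ i ih =>
    have hc : ((i + 1 : Nat) : Int) - 1 = (i : Int) := by push_cast; ring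
    rw [hc, PySem.List.pyRange_neg_one_cons (by omega)]
    rw [List.foldl_cons]
    have hnotmem : d.contains (i : Int) = false := by
      rw [PySem.Dict.contains_eq_decide_mem_keys]
      simp only [decide_eq_false_iff_not]
      intro hmem
      have := hfresh _ hmem
      omega
    have hgi : PySem.List.pyGetD xs ((i : Nat) : Int) 0 = xs.getD i 0 :=
      PySem.List.pyGetD_natCast xs i 0
    have hleft : (if (i : Int) - 1 ≥ 0 ∧ PySem.List.pyGetD xs ((i : Int) - 1) 0 > 0
                  then PySem.List.pyGetD xs ((i : Int) - 1) 0 else 0)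
        = (if 0 < i ∧ 0 < xs.getD (i - 1) 0 then xs.getD (i - 1) 0 else 0) := by
      by_cases hi0 : 0 < i
      · have h1 : (i : Int) - 1 = ((i - 1 : Nat) : Int) := by omega
        rw [h1, PySem.List.pyGetD_natCast]
        have h2 : 1 ≤ i := hi0
        simp [h2, hi0]
      · have h0 : i = 0 := by omega
        subst h0
        norm_num
    simp only [pvBStep, hgi, hleft, pvSpecGo]
    by_cases hv : 0 < xs.getD i 0
    · simp only [if_pos (show xs.getD i 0 > 0 from hv)]
      by_cases hdrop : xs.getD i 0 ≤ r + (if 0 < i ∧ 0 < xs.getD (i - 1) 0 then xs.getD (i - 1) 0 else 0)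
      · rw [if_pos (show r + _ ≥ xs.getD i 0 from hdrop), if_pos hdrop]
        exact ih d 0 (fun k hk => le_of_lt (lt_of_lt_of_le (by omega) (hfresh k hk)))
      · rw [if_neg (show ¬ r + _ ≥ xs.getD i 0 from hdrop), if_neg hdrop]
        have hins := ih (d.insert ((i : Nat) : Int) (xs.getD i 0)) (xs.getD i 0)
          (fun k hk => by
            rcases (PySem.Dict.mem_keys_insert _ _ _ _).mp hk with h | h
            · omega
            · exact le_of_lt (lt_of_lt_of_le (by omega) (hfresh k h)))
        rw [hins, PySem.Dict.items_insert_of_not_contains _ _ hnotmem]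
        simp
    · simp only [if_neg (show ¬ xs.getD i 0 > 0 from hv)]
      exact ih d 0 (fun k hk => le_of_lt (lt_of_lt_of_le (by omega) (hfresh k hk)))

lemma pvA_loop (xs : List Int) (i : Nat) (hi : i ≤ xs.length) (S : List (Int × Int)) (r : Int)
    (hS : ∀ p ∈ S, ((i : Int)) ≤ p.1)
    (hr : (PySem.Dict.mk S).getD (i : Int) 0 = r) :
    ((pvQ xs i).map Prod.fst).foldl pvAStep (PySem.Dict.mk (S ++ pvQ xs i))
      = PySem.Dict.mk (S ++ pvSpecGo xs i r) := by
  induction i generalizing S r with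
  | zero => simp [pvQ_zero, pvSpecGo]
  | succ i ih =>
    have hSnone : ∀ k : Int, k < ((i + 1 : Nat) : Int) → (PySem.Dict.mk S).get? k = none :=
      fun k hk => get?_mk_eq_none _ _ (fun p hp => by have := hS p hp; omega)
    rw [pvQ_succ xs i (by omega)]
    by_cases hv : 0 < xs.getD i 0
    · rw [if_pos hv]
      have g3 : (PySem.Dict.mk (S ++ (((i : Int), xs.getD i 0) :: pvQ xs i))).getD (i : Int) 0
          = xs.getD i 0 := by
        rw [getD_mk_append_left_none _ _ _ (hSnone (i : Int) (by omega))]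
        simp [PySem.Dict.getD, PySem.Dict.get?_mk_cons]
      have g1 : (PySem.Dict.mk (S ++ (((i : Int), xs.getD i 0) :: pvQ xs i))).getD ((i : Int) + 1) 0
          = r := by
        have hc : ((i : Int)) + 1 = ((i + 1 : Nat) : Int) := by push_cast; ring
        rw [getD_mk_append_right_none _ _ _ (by
          rw [PySem.Dict.get?_mk_cons, if_neg (by simp only [beq_iff_eq]; omega)]
          exact pvQ_get?_none xs i ((i : Int) + 1) (by omega))]
        rw [hc]
        exact hr
      have g2 : (PySem.Dict.mk (S ++ (((i : Int), xs.getD i 0) :: pvQ xs i))).getD ((i : Int) - 1) 0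
          = (if 0 < i ∧ 0 < xs.getD (i - 1) 0 then xs.getD (i - 1) 0 else 0) := by
        rw [getD_mk_append_left_none _ _ _ (hSnone ((i : Int) - 1) (by omega))]
        simp only [PySem.Dict.getD, PySem.Dict.get?_mk_cons]
        rw [if_neg (by simp only [beq_iff_eq]; omega)]
        cases i with
        | zero =>
          rw [pvQ_zero]
          simp [PySem.Dict.get?]
        | succ j =>
          have hj : ((j + 1 : Nat) : Int) - 1 = (j : Nat) := by push_cast; ring
          rw [hj, pvQ_succ xs j (by omega)]
          by_cases hw : 0 < xs.getD j 0
          · rw [if_pos hw]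
            rw [PySem.Dict.get?_mk_cons, if_pos (by simp)]
            simp only [Option.getD_some]
            rw [if_pos (by simpa using hw)]
            simp
          · rw [if_neg hw, pvQ_get?_none xs j (j : Int) (by omega)]
            simp only [Option.getD_none]
            rw [if_neg (fun h : 0 < j + 1 ∧ 0 < xs.getD (j + 1 - 1) 0 => hw (by simpa using h.2))]
      simp only [List.map_cons, List.foldl_cons]
      have hstep : pvAStep (PySem.Dict.mk (S ++ (((i : Int), xs.getD i 0) :: pvQ xs i))) (i : Int)
          = if xs.getD i 0 ≤ r + (if 0 < i ∧ 0 < xs.getD (i - 1) 0 then xs.getD (i - 1) 0 else 0)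
            then (PySem.Dict.mk (S ++ (((i : Int), xs.getD i 0) :: pvQ xs i))).erase (i : Int)
            else PySem.Dict.mk (S ++ (((i : Int), xs.getD i 0) :: pvQ xs i)) := by
        simp only [pvAStep, g1, g2, g3, ge_iff_le]
      by_cases hdrop : xs.getD i 0 ≤ r + (if 0 < i ∧ 0 < xs.getD (i - 1) 0 then xs.getD (i - 1) 0 else 0)
      · rw [hstep, if_pos hdrop]
        have herase : (PySem.Dict.mk (S ++ (((i : Int), xs.getD i 0) :: pvQ xs i))).erase (i : Int)
            = PySem.Dict.mk (S ++ pvQ xs i) := by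
          simp only [PySem.Dict.erase, List.filter_append, List.filter_cons]
          rw [List.filter_eq_self.mpr (fun p hp => by
            have := hS p hp
            simp only [Bool.not_eq_eq_eq_not, Bool.not_true, beq_eq_false_iff_ne, ne_eq]
            omega)]
          rw [List.filter_eq_self.mpr (fun p hp => by
            have := pvQ_mem xs i hp
            simp only [Bool.not_eq_eq_eq_not, Bool.not_true, beq_eq_false_iff_ne, ne_eq]
            omega)]
          simp
        rw [herase]
        have := ih (by omega) S 0 (fun p hp => by have := hS p hp; omega)
          (by simp [PySem.Dict.getD, hSnone (i : Int) (by omega)])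
        rw [this]
        simp only [pvSpecGo]
        rw [if_pos hv, if_pos hdrop]
      · rw [hstep, if_neg hdrop]
        have hsplit : S ++ (((i : Int), xs.getD i 0) :: pvQ xs i)
            = (S ++ [((i : Int), xs.getD i 0)]) ++ pvQ xs i := by
          simp
        rw [hsplit]
        have := ih (by omega) (S ++ [((i : Int), xs.getD i 0)]) (xs.getD i 0)
          (fun p hp => by
            rcases List.mem_append.mp hp with h | h
            · have := hS p h; omega
            · simp at h; subst h; simp)
          (by
            rw [getD_mk_append_left_none _ _ _ (hSnone (i : Int) (by omega))]
            simp [PySem.Dict.getD, PySem.Dict.get?_mk_cons])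
        rw [this]
        simp only [pvSpecGo]
        rw [if_pos hv, if_neg hdrop]
        simp
    · rw [if_neg hv]
      have := ih (by omega) S 0 (fun p hp => by have := hS p hp; omega)
        (by simp [PySem.Dict.getD, hSnone (i : Int) (by omega)])
      rw [this]
      simp only [pvSpecGo]
      rw [if_neg hv]

lemma pvA_sd (xs : List Int) :
    ((((PySem.List.sorted (create_index_value_dict xs).items (fun item => item.1)).reverse.filter
        (fun p => decide (p.2 > 0))).foldl (fun d p => d.insert p.1 p.2) PySem.Dict.empty))
      = PySem.Dict.mk (pvQ xs xs.length) := by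
  have h1 : (create_index_value_dict xs).items = PySem.List.enumerate xs := by
    unfold create_index_value_dict
    rw [PySem.Dict.items_foldl_insert_fresh (PySem.List.enumerate xs) Prod.fst Prod.snd
      PySem.Dict.empty (fun a _ => PySem.Dict.contains_empty a.1)
      (by rw [PySem.List.map_fst_enumerate]; exact PySem.List.nodup_pyRange_one _ _)]
    simp [PySem.Dict.empty]
  rw [h1]
  have h2 : PySem.List.sorted (PySem.List.enumerate xs) (fun item => item.1)
      = PySem.List.enumerate xs :=
    PySem.List.sorted_eq_self_of_pairwise _ _
      ((PySem.List.pairwise_lt_enumerate xs 0).imp le_of_lt)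
  rw [h2]
  have h3 : ((PySem.List.enumerate xs).reverse.filter (fun p => decide (p.2 > 0)))
      = pvQ xs xs.length := by
    unfold pvQ
    rw [List.take_length]
  rw [h3]
  have hnd : ((pvQ xs xs.length).map Prod.fst).Nodup := by
    have hsub : (pvQ xs xs.length).Sublist ((PySem.List.enumerate xs).reverse) := by
      unfold pvQ
      rw [List.take_length]
      exact List.filter_sublist
    apply (hsub.map Prod.fst).nodup
    rw [List.map_reverse, PySem.List.map_fst_enumerate]
    exact List.nodup_reverse.mpr (PySem.List.nodup_pyRange_one _ _)
  apply PySem.Dict.ext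
  rw [PySem.Dict.items_foldl_insert_fresh (pvQ xs xs.length) Prod.fst Prod.snd
      PySem.Dict.empty (fun a _ => PySem.Dict.contains_empty a.1) hnd]
  simp [PySem.Dict.empty]

lemma pvA_eq (xs : List Int) :
    non_adj_sum xs = (pvSpecGo xs xs.length 0, ((pvSpecGo xs xs.length 0).map Prod.snd).sum) := by
  simp only [non_adj_sum]
  rw [pvA_sd xs]
  have hloop := pvA_loop xs xs.length le_rfl [] 0 (by simp)
    (by simp [PySem.Dict.getD, PySem.Dict.get?])
  simp only [List.nil_append] at hloop
  have hkeys : (PySem.Dict.mk (pvQ xs xs.length)).keys = (pvQ xs xs.length).map Prod.fst := rfl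
  rw [hkeys, hloop]
  simp [PySem.Dict.values]

lemma pvB_eq (xs : List Int) :
    non_adj_sum_alt xs = (pvSpecGo xs xs.length 0, ((pvSpecGo xs xs.length 0).map Prod.snd).sum) := by
  simp only [non_adj_sum_alt]
  have hloop := pvB_loop xs xs.length PySem.Dict.empty 0
    (by simp [PySem.Dict.keys, PySem.Dict.empty])
  simp only [PySem.Dict.empty] at hloop ⊢
  simp only [List.nil_append] at hloop
  simp [PySem.Dict.values, hloop]

lemma pv_main (xs : List Int) : non_adj_sum xs = non_adj_sum_alt xs := by
  rw [pvA_eq, pvB_eq]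

-- ===== VERDICT (by name: the statement is the Claim_ definition above) =====
theorem non_adj_sum_spec : Claim_equal_non_adj_sum := by
  intro xs _
  unfold Spec_non_adj_sum
  exact pv_main xs
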